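-- pv_equiv track=rewrite | github.com/TracyChacon/solving_problems | 2025_08_28_second_best.py | get_laptop_cost
-- ===== SOURCE A (Python) =====
-- def get_laptop_cost(laptops:list, budget:int) -> int:
--     ONLY_ONE_LAPTOP = True if (len(laptops) == 0) else False
--     NO_LAPTOPS = True if (len(laptops) == 0) else False
--
--     most_expensive = laptops[0]
--     second_most_expensive = laptops[1]
--
--     if NO_LAPTOPS:
--         return 0
--
--     if ONLY_ONE_LAPTOP:
--         return 0 if (most_expensive > budget) else most_expensive
--
--     laptops.sort(reverse=True)
--
--     for i in range(1, len(laptops)):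
--         if laptops[i] <= budget:
--             return laptops[i]
--
--     return 0
-- ===== SOURCE B (Python) =====
-- def get_laptop_cost(laptops: list, budget: int) -> int:
--     # O(n): skip one instance of the global maximum, then take the best
--     # affordable price among the rest.  (Does not mutate the input list.)
--     m = max(laptops)
--     rest = list(laptops)
--     rest.remove(m)
--     candidates = [x for x in rest if x <= budget]
--     return max(candidates) if candidates else 0
-- ===== Notes on version B (the rewrite author's own statement) =====
-- stated objective: faster
-- what changed: Replaces the descending sort plus scan-from-index-1 by a linear pass: remove one instance of the global maximum and return the largest remaining price within budget (0 if none); B also does not mutate the input list, while A sorts it in place.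
import Mathlib
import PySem

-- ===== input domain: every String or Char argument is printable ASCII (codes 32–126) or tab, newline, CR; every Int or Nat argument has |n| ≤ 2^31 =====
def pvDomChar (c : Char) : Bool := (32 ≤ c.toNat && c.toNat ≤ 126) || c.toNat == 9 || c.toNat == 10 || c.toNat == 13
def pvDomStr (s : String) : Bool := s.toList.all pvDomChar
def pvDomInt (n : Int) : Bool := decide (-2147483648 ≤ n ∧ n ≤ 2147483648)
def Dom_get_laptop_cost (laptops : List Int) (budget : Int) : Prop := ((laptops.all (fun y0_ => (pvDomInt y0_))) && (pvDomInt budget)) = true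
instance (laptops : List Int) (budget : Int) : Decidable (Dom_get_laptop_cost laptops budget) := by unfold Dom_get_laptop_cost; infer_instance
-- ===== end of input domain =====

-- B replaces A's descending sort + scan by a single linear "drop one max, take best affordable" pass;
-- A sorts the caller's list in place, B does not mutate it — the equivalence proved here is about the return value.

-- ===== PORT A =====
-- the for-loop 'for i in range(1, len(laptops)): if laptops[i] <= budget: return laptops[i]' over the sorted list's tail
def pvScanLE : List Int → Int → Int
  | [], _ => 0
  | x :: xs, b => if x ≤ b then x else pvScanLE xs b

def get_laptop_cost (laptops : List Int) (budget : Int) : Int :=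
  -- laptops[0] / laptops[1] raise IndexError on fewer than two laptops (none here; excluded by Pre_)
  match PySem.List.pyGet? laptops 0, PySem.List.pyGet? laptops 1 with
  | some most_expensive, some _second_most_expensive =>
    let only_one_laptop := laptops.length == 0
    let no_laptops := laptops.length == 0
    if no_laptops then 0
    else if only_one_laptop then (if most_expensive > budget then 0 else most_expensive)
    else
      let s := PySem.List.sorted laptops (fun x => x) true
      pvScanLE (s.drop 1) budget
  | _, _ => 0

-- ===== PORT B =====
def get_laptop_cost_alt (laptops : List Int) (budget : Int) : Int :=
  match PySem.List.max? laptops (fun x => x) with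
  | none => 0          -- max([]) raises ValueError (excluded by Pre_)
  | some m =>
    match PySem.List.remove? laptops m with
    | none => 0        -- unreachable: m ∈ laptops
    | some rest =>
      let candidates := rest.filter (fun x => decide (x ≤ budget))
      match PySem.List.max? candidates (fun x => x) with
      | some v => v
      | none => 0

-- ===== PRECONDITION & SPEC =====
-- A indexes laptops[0] and laptops[1] before any guard, so it raises IndexError on fewer than two laptops.
def Pre_get_laptop_cost (laptops : List Int) (budget : Int) : Prop := 2 ≤ laptops.length
instance (laptops : List Int) (budget : Int) : Decidable (Pre_get_laptop_cost laptops budget) := by unfold Pre_get_laptop_cost; infer_instance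
def pvWitness_get_laptop_cost : List Int × Int := ([3, 7, 5], 6)

def Spec_get_laptop_cost (laptops : List Int) (budget : Int) (out : Int) : Prop := out = get_laptop_cost_alt laptops budget
instance (laptops : List Int) (budget : Int) (out : Int) : Decidable (Spec_get_laptop_cost laptops budget out) := by unfold Spec_get_laptop_cost; infer_instance

-- ===== CLAIM (what is proved, stated in full; the proofs are below) =====
def Claim_equal_get_laptop_cost : Prop := ∀ (laptops : List Int) (budget : Int), Dom_get_laptop_cost laptops budget → Pre_get_laptop_cost laptops budget → Spec_get_laptop_cost laptops budget (get_laptop_cost laptops budget)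

-- ===== LEMMAS AND PROOFS =====

-- the result B computes from a candidate list, as a function (for permutation reasoning)
def pvBestOf (l : List Int) : Int :=
  match PySem.List.max? l (fun x => x) with
  | some v => v
  | none => 0

theorem pvBestOf_eq_of_perm (l1 l2 : List Int) (h : l1.Perm l2) : pvBestOf l1 = pvBestOf l2 := by
  unfold pvBestOf
  cases h1 : PySem.List.max? l1 (fun x : Int => x) with
  | none =>
    have hl1 : l1 = [] := (PySem.List.max?_eq_none_iff l1 _).1 h1
    subst hl1
    have hl2 : l2 = [] := h.nil_eq.symm
    subst hl2
    rfl
  | some v1 =>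
    cases h2 : PySem.List.max? l2 (fun x : Int => x) with
    | none =>
      have hl2 : l2 = [] := (PySem.List.max?_eq_none_iff l2 _).1 h2
      subst hl2
      have hl1 : l1 = [] := h.symm.nil_eq.symm
      subst hl1
      simp [PySem.List.max?] at h1
    | some v2 =>
      have hv1 := PySem.List.max?_mem h1
      have hv2 := PySem.List.max?_mem h2
      have hle1 : v1 ≤ v2 := PySem.List.max?_isMax h2 v1 (h.mem_iff.mp hv1)
      have hle2 : v2 ≤ v1 := PySem.List.max?_isMax h1 v2 (h.symm.mem_iff.mp hv2)
      exact le_antisymm hle1 hle2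

-- A's scan of a descending list's tail returns exactly the best element ≤ budget (0 if none)
theorem pvScanLE_eq_bestOf (t : List Int) (b : Int) (hp : t.Pairwise (fun x y => y ≤ x)) :
    pvScanLE t b = pvBestOf (t.filter (fun x => decide (x ≤ b))) := by
  induction t with
  | nil => rfl
  | cons x xs ih =>
    have hx := (List.pairwise_cons.mp hp).1
    have hxs := (List.pairwise_cons.mp hp).2
    by_cases hb : x ≤ b
    · simp only [pvScanLE, if_pos hb]
      have hf : (x :: xs).filter (fun y => decide (y ≤ b)) = x :: xs.filter (fun y => decide (y ≤ b)) := by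
        simp [hb]
      rw [hf]
      unfold pvBestOf
      cases h2 : PySem.List.max? (x :: xs.filter (fun y => decide (y ≤ b))) (fun y : Int => y) with
      | none => simp [PySem.List.max?_eq_none_iff] at h2
      | some v =>
        show x = v
        have hvmem := PySem.List.max?_mem h2
        have hxle : x ≤ v := PySem.List.max?_isMax h2 x (by simp)
        have hvle : v ≤ x := by
          rcases List.mem_cons.mp hvmem with h | h
          · exact h.le
          · exact hx v (List.mem_of_mem_filter h)
        exact le_antisymm hxle hvle
    · have hf : (x :: xs).filter (fun y => decide (y ≤ b)) = xs.filter (fun y => decide (y ≤ b)) := by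
        simp [hb]
      simp only [pvScanLE, if_neg hb]
      rw [hf]
      exact ih hxs

theorem get_laptop_cost_spec : Claim_equal_get_laptop_cost := by
  intro laptops budget _hdom hpre
  unfold Spec_get_laptop_cost
  unfold Pre_get_laptop_cost at hpre
  -- destructure: at least two elements
  obtain ⟨a, rest, rfl⟩ : ∃ a rest, laptops = a :: rest := by
    cases laptops with
    | nil => simp at hpre
    | cons a t => exact ⟨a, t, rfl⟩
  obtain ⟨b2, rest2, rfl⟩ : ∃ b2 rest2, rest = b2 :: rest2 := by
    cases rest with
    | nil => simp at hpre
    | cons b t => exact ⟨b, t, rfl⟩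
  set laptops := a :: b2 :: rest2 with hl
  -- the sorted list
  have hperm : (PySem.List.sorted laptops (fun x => x) true).Perm laptops :=
    PySem.List.sorted_perm laptops (fun x => x) true
  have hslen : (PySem.List.sorted laptops (fun x => x) true).length = laptops.length :=
    hperm.length_eq
  obtain ⟨m0, t, hs⟩ : ∃ m0 t, PySem.List.sorted laptops (fun x => x) true = m0 :: t := by
    cases h : PySem.List.sorted laptops (fun x => x) true with
    | nil => rw [h] at hslen; simp [hl] at hslen
    | cons m0 t => exact ⟨m0, t, rfl⟩
  have hm0mem : m0 ∈ laptops := hperm.subset (hs ▸ List.mem_cons_self ..)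
  have hm0max : ∀ y ∈ laptops, y ≤ m0 :=
    PySem.List.key_head_sorted_rev_ge (xs := laptops) (key := fun x => x) hs
  -- B's max
  have hmax : ∃ m, PySem.List.max? laptops (fun x : Int => x) = some m := by
    cases h : PySem.List.max? laptops (fun x : Int => x) with
    | none => rw [PySem.List.max?_eq_none_iff] at h; simp [hl] at h
    | some m => exact ⟨m, rfl⟩
  obtain ⟨m, hm⟩ := hmax
  have hmmem : m ∈ laptops := PySem.List.max?_mem hm
  have hmeq : m = m0 :=
    le_antisymm (hm0max m hmmem) (PySem.List.max?_isMax hm m0 hm0mem)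
  subst hmeq
  have hrem : PySem.List.remove? laptops m = some (laptops.erase m) :=
    PySem.List.remove?_eq_some_erase laptops m hmmem
  -- unfold both ports
  have hA : get_laptop_cost laptops budget = pvScanLE t budget := by
    simp only [get_laptop_cost, hl, PySem.List.pyGet?_zero_cons]
    rw [show PySem.List.pyGet? (a :: b2 :: rest2) 1 = some b2 by
      have := PySem.List.pyGet?_cons_succ (x := a) (xs := b2 :: rest2) (n := 0)
      simpa using this]
    simp only [← hl, hs]
    simp
  have hB : get_laptop_cost_alt laptops budget =
      pvBestOf ((laptops.erase m).filter (fun x => decide (x ≤ budget))) := by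
    simp only [get_laptop_cost_alt, hm, hrem, pvBestOf]
  -- tail is pairwise descending
  have hpair : (m :: t).Pairwise (fun x y : Int => y ≤ x) := by
    have := PySem.List.sorted_pairwise_rev (xs := laptops) (key := fun x : Int => x)
    rwa [hs] at this
  have hpt : t.Pairwise (fun x y : Int => y ≤ x) := (List.pairwise_cons.mp hpair).2
  -- erased lists are permutations
  have hpermE : (laptops.erase m).Perm t := by
    have h1 : (laptops.erase m).Perm ((PySem.List.sorted laptops (fun x => x) true).erase m) :=
      (hperm.erase m).symm
    rw [hs] at h1
    simpa [List.erase_cons_head] using h1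
  rw [hA, hB, pvScanLE_eq_bestOf t budget hpt]
  exact (pvBestOf_eq_of_perm _ _ (hpermE.filter _)).symm
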